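-- pv_equiv track=rewrite | github.com/JoonHyeok-hozy-Kim/algorithm_study | BaekJoon/Review/Rev_221025/Sol_01_Week3_1285_failed.py | tail_cnt
-- ===== SOURCE A (Python) =====
-- def tail_cnt(C):
--     result = 0
--     for i in range(len(C)):
--         line = C[i]
--         for j in range(len(C)):
--             if line % 2 == 0:
--                 result += 1
--             line //= 2
--     return result
-- ===== SOURCE B (Python) =====
-- def tail_cnt(C):
--     n = len(C)
--     m = 1 << n
--     return sum(n - (x % m).bit_count() for x in C)
-- ===== Notes on version B (the rewrite author's own statement) =====
-- stated objective: faster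
-- what changed: Replaces the O(n^2) nested halving/parity loops by one pass that, per element, takes n minus the popcount of x mod 2^n (its lowest n bits).
import Mathlib
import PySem

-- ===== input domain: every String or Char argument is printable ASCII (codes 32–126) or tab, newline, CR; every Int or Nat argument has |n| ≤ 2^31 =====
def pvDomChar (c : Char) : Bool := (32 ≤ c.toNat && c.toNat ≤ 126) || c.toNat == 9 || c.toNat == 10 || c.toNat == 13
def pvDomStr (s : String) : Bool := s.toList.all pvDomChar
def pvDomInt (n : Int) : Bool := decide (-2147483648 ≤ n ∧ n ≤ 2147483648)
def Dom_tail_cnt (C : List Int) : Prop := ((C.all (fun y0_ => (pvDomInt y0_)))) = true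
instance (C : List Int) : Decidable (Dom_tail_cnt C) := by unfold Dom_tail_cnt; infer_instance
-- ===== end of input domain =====

-- B replaces A's nested halving/parity loops by one pass adding n - popcount(x mod 2^n) per element (objective: faster).

-- ===== PORT A =====
def tail_cnt (C : List Int) : Int :=
  (PySem.List.pyRange 0 (PySem.List.len C) 1).foldl
    (fun result i =>
      let line := PySem.List.pyGetD C i 0
      ((PySem.List.pyRange 0 (PySem.List.len C) 1).foldl
        (fun st _j =>
          ((if PySem.Int.mod st.2 2 = 0 then st.1 + 1 else st.1), PySem.Int.floordiv st.2 2))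
        (result, line)).1)
    0

-- ===== PORT B =====
def tail_cnt_alt (C : List Int) : Int :=
  let n := C.length
  let m : Int := (1 : Int) <<< n
  (C.map (fun x => (n : Int) - (PySem.Int.bitCount (PySem.Int.mod x m) : Int))).sum

-- ===== PRECONDITION & SPEC =====
def Spec_tail_cnt (C : List Int) (out : Int) : Prop := out = tail_cnt_alt C
instance (C : List Int) (out : Int) : Decidable (Spec_tail_cnt C out) := by unfold Spec_tail_cnt; infer_instance

-- ===== CLAIM (what is proved, stated in full; the proofs are below) =====
def Claim_equal_tail_cnt : Prop := ∀ (C : List Int), Dom_tail_cnt C → Spec_tail_cnt C (tail_cnt C)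

-- ===== LEMMAS AND PROOFS =====

theorem pv_one_shiftLeft (n : Nat) : (1 : Int) <<< n = 2 ^ n := by
  rw [Int.shiftLeft_eq]; ring

theorem pv_mod_split (n : Nat) (x : Int) :
    x % (2 ^ (n + 1)) = 2 * ((x / 2) % (2 ^ n)) + x % 2 := by
  have hm : (0:Int) < 2 ^ n := by positivity
  set q := x / 2 with hq
  have h1 : 2 * q + x % 2 = x := Int.mul_ediv_add_emod x 2
  have h2 : (2:Int)^n * (q / (2^n)) + q % (2^n) = q := Int.mul_ediv_add_emod q (2^n)
  have hx : x = 2 ^ (n+1) * (q / (2^n)) + (2 * (q % (2^n)) + x % 2) := by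
    rw [pow_succ]; nlinarith [h1, h2]
  have hr0 : (0:Int) ≤ x % 2 := Int.emod_nonneg x (by norm_num)
  have hr1 : x % 2 < 2 := Int.emod_lt_of_pos x (by norm_num)
  have hq0 : (0:Int) ≤ q % (2^n) := Int.emod_nonneg q (by positivity)
  have hq1 : q % (2^n) < 2^n := Int.emod_lt_of_pos q hm
  calc x % (2 ^ (n+1)) = (2 ^ (n+1) * (q / (2^n)) + (2 * (q % (2^n)) + x % 2)) % (2^(n+1)) := by rw [← hx]
    _ = (2 * (q % (2^n)) + x % 2) % (2^(n+1)) := by rw [add_comm, Int.add_mul_emod_self_left]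
    _ = 2 * (q % (2^n)) + x % 2 := Int.emod_eq_of_lt (by omega) (by rw [pow_succ]; omega)

theorem pv_bitCount_step (y : Int) (hy : 0 ≤ y) :
    PySem.Int.bitCount y = (y % 2).toNat + PySem.Int.bitCount (y / 2) := by
  rcases lt_or_eq_of_le hy with h | h
  · rw [PySem.Int.bitCount_of_pos h, PySem.Int.mod_eq_emod_of_pos (by norm_num),
      PySem.Int.floordiv_eq_ediv_of_pos (by norm_num)]
  · simp [← h]

theorem pv_key (n : Nat) (x : Int) :
    PySem.Int.bitCount (PySem.Int.mod x ((1 : Int) <<< (n + 1)))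
      = (PySem.Int.mod x 2).toNat
        + PySem.Int.bitCount (PySem.Int.mod (PySem.Int.floordiv x 2) ((1 : Int) <<< n)) := by
  have h2n : (0:Int) < 2 ^ n := by positivity
  have h2n1 : (0:Int) < 2 ^ (n+1) := by positivity
  rw [pv_one_shiftLeft, pv_one_shiftLeft,
    PySem.Int.mod_eq_emod_of_pos h2n1, PySem.Int.mod_eq_emod_of_pos h2n,
    PySem.Int.mod_eq_emod_of_pos (show (0:Int) < 2 by norm_num),
    PySem.Int.floordiv_eq_ediv_of_pos (show (0:Int) < 2 by norm_num)]
  have hy : (0:Int) ≤ x % (2^(n+1)) := Int.emod_nonneg x (by positivity)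
  rw [pv_bitCount_step _ hy, pv_mod_split n x]
  have hq0 : (0:Int) ≤ (x/2) % (2^n) := Int.emod_nonneg _ (by positivity)
  have hq1 : (x/2) % (2^n) < 2^n := Int.emod_lt_of_pos _ h2n
  have hr0 : (0:Int) ≤ x % 2 := Int.emod_nonneg x (by norm_num)
  have hr1 : x % 2 < 2 := Int.emod_lt_of_pos x (by norm_num)
  have e1 : (2 * ((x/2) % (2^n)) + x % 2) % 2 = x % 2 := by
    omega
  have e2 : (2 * ((x/2) % (2^n)) + x % 2) / 2 = (x/2) % (2^n) := by
    omega
  rw [e1, e2]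

theorem pv_inner (l : List Int) (r x : Int) :
    (l.foldl
      (fun st (_j : Int) =>
        ((if PySem.Int.mod st.2 2 = 0 then st.1 + 1 else st.1), PySem.Int.floordiv st.2 2))
      (r, x)).1
    = r + (l.length : Int) - (PySem.Int.bitCount (PySem.Int.mod x ((1 : Int) <<< l.length)) : Int) := by
  induction l generalizing r x with
  | nil => simp
  | cons a t ih =>
    simp only [List.foldl_cons, List.length_cons, ih]
    rw [pv_key t.length x]
    have h0 := PySem.Int.mod_nonneg x (show (0:Int) < 2 by norm_num)
    have h1 := PySem.Int.mod_lt x (show (0:Int) < 2 by norm_num)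
    split_ifs with h
    · rw [h]; push_cast; ring
    · have : PySem.Int.mod x 2 = 1 := by omega
      rw [this]; push_cast; ring

theorem pv_foldl_sum (h : Int → Int) : ∀ (l : List Int) (r : Int),
    l.foldl (fun acc x => acc + h x) r = r + (l.map h).sum := by
  intro l
  induction l with
  | nil => simp
  | cons a t ih => intro r; simp [ih, add_assoc]

-- ===== VERDICT (by name: the statement is the Claim_ definition above) =====
theorem tail_cnt_spec : Claim_equal_tail_cnt := by
  intro C _
  unfold Spec_tail_cnt tail_cnt tail_cnt_alt
  rw [PySem.List.foldl_pyRange_zero_pyGetD C 0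
    (fun (r x : Int) =>
      ((PySem.List.pyRange 0 (PySem.List.len C) 1).foldl
        (fun st (_j : Int) =>
          ((if PySem.Int.mod st.2 2 = 0 then st.1 + 1 else st.1), PySem.Int.floordiv st.2 2))
        (r, x)).1) 0]
  simp only [pv_inner, PySem.List.length_pyRange_one, PySem.List.len_eq, sub_zero,
    Int.toNat_natCast, add_sub_assoc]
  rw [pv_foldl_sum]
  simp
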